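-- pv_equiv track=rewrite | github.com/beomsun1234/TIL | algorithm/baekjoon/12100 2048 (Easy).py | combineBlock
-- ===== SOURCE A (Python) =====
-- def combineBlock(block) -> list:
--     cBlock = []
--     pos = 0
--     while pos < len(block):
--             #내 다음이 존재하면
--             if pos+1< len(block):
--                 # 그 다음 값이 현재와 같다면 합친다.
--                 if block[pos] == block[pos+1]:
--                     cBlock.append(block[pos] + block[pos+1])
--                     pos +=2
--                 else:
--                     cBlock.append(block[pos])
--                     pos+=1
--             else:
--                 cBlock.append(block[pos])
--                 pos+=1
--     return cBlock
-- ===== SOURCE B (Python) =====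
-- def combineBlock(block) -> list:
--     out = []
--     pending = None
--     for x in block:
--         if pending is None:
--             pending = x
--         elif pending == x:
--             out.append(pending + x)
--             pending = None
--         else:
--             out.append(pending)
--             pending = x
--     if pending is not None:
--         out.append(pending)
--     return out
-- ===== Notes on version B (the rewrite author's own statement) =====
-- stated objective: faster
-- what changed: Replaced the index-advancing while loop with one-position lookahead by a single for-loop over the elements carrying an Optional pending tile that is emitted merged or alone (pending resets after a merge, so no cascading).
import Mathlib
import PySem

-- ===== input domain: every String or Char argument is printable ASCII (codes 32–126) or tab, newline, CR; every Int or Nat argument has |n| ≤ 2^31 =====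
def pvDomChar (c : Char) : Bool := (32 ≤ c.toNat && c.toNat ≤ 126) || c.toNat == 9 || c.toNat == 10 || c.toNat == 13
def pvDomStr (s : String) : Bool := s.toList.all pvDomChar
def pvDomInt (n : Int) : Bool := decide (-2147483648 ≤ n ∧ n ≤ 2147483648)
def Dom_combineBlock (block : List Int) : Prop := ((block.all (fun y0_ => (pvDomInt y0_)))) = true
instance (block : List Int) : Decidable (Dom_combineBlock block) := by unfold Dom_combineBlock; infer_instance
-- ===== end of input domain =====

-- B replaces A's index-advancing while loop with one-position lookahead by a single for-loop
-- carrying an Optional pending tile (reset after each merge, so no cascading); same values, different decomposition.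

-- ===== PORT A =====
-- A's while loop over pos with accumulator cBlock; block[pos] accesses are in range (pos < len), ported as getD.
def combineBlockLoop (block : List Int) (pos : Nat) (cBlock : List Int) : List Int :=
  if pos < block.length then
    if pos + 1 < block.length then
      if block.getD pos 0 == block.getD (pos + 1) 0 then
        combineBlockLoop block (pos + 2) (cBlock ++ [block.getD pos 0 + block.getD (pos + 1) 0])
      else
        combineBlockLoop block (pos + 1) (cBlock ++ [block.getD pos 0])
    else
      combineBlockLoop block (pos + 1) (cBlock ++ [block.getD pos 0])
  else cBlock
termination_by block.length - pos
decreasing_by all_goals omega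

def combineBlock (block : List Int) : List Int :=
  combineBlockLoop block 0 []

-- ===== PORT B =====
-- Source B's for-loop as a foldl over (out, pending); the final 'if pending is not None' flush follows.
def combineBlockStep (acc : List Int × Option Int) (x : Int) : List Int × Option Int :=
  match acc.2 with
  | none => (acc.1, some x)
  | some p => if p == x then (acc.1 ++ [p + x], none) else (acc.1 ++ [p], some x)

def combineBlock_alt (block : List Int) : List Int :=
  let r := block.foldl combineBlockStep ([], none)
  match r.2 with
  | none => r.1
  | some p => r.1 ++ [p]

-- ===== PRECONDITION & SPEC =====
def Spec_combineBlock (block : List Int) (out : List Int) : Prop := out = combineBlock_alt block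
instance (block : List Int) (out : List Int) : Decidable (Spec_combineBlock block out) := by unfold Spec_combineBlock; infer_instance

-- ===== CLAIM (what is proved, stated in full; the proofs are below) =====
def Claim_equal_combineBlock : Prop := ∀ (block : List Int), Dom_combineBlock block → Spec_combineBlock block (combineBlock block)

-- ===== LEMMAS AND PROOFS =====
-- Reference recursive characterisation of the greedy non-cascading merge; both ports are proved equal to it.
def mergeRec : List Int → List Int
  | [] => []
  | [x] => [x]
  | x :: y :: rest =>
    if x = y then (x + y) :: mergeRec rest
    else x :: mergeRec (y :: rest)

def flushB (r : List Int × Option Int) : List Int :=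
  match r.2 with
  | none => r.1
  | some p => r.1 ++ [p]

theorem combineBlockLoop_eq_mergeRec_drop (block : List Int) (pos : Nat) (cBlock : List Int) :
    combineBlockLoop block pos cBlock = cBlock ++ mergeRec (block.drop pos) := by
  induction hn : block.length - pos using Nat.strong_induction_on generalizing pos cBlock with
  | _ n ih =>
  rw [combineBlockLoop]
  by_cases h1 : pos < block.length
  · have hd1 : block.drop pos = block[pos] :: block.drop (pos + 1) :=
      (List.getElem_cons_drop (as := block) (i := pos) h1).symm
    simp only [if_pos h1]
    by_cases h2 : pos + 1 < block.length
    · have hd2 : block.drop (pos + 1) = block[pos + 1] :: block.drop (pos + 2) :=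
        (List.getElem_cons_drop (as := block) (i := pos + 1) h2).symm
      have hg1 : block.getD pos 0 = block[pos] := List.getD_eq_getElem _ _ h1
      have hg2 : block.getD (pos + 1) 0 = block[pos + 1] := List.getD_eq_getElem _ _ h2
      simp only [if_pos h2, hg1, hg2]
      by_cases heq : block[pos] = block[pos + 1]
      · simp only [heq, beq_self_eq_true, if_pos]
        rw [ih (block.length - (pos + 2)) (by omega) (pos + 2) _ rfl]
        rw [hd1, hd2, mergeRec]
        simp [heq]
      · rw [if_neg (by simpa using heq)]
        rw [ih (block.length - (pos + 1)) (by omega) (pos + 1) _ rfl]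
        rw [hd1, hd2, mergeRec]
        simp [heq]
    · have hg1 : block.getD pos 0 = block[pos] := List.getD_eq_getElem _ _ h1
      have hnil : block.drop (pos + 1) = [] := List.drop_eq_nil_of_le (by omega)
      simp only [if_neg h2, hg1]
      rw [ih (block.length - (pos + 1)) (by omega) (pos + 1) _ rfl]
      rw [hd1, hnil]
      simp [mergeRec]
  · have hnil : block.drop pos = [] := List.drop_eq_nil_of_le (by omega)
    simp [if_neg h1, hnil, mergeRec]

theorem foldB_eq_mergeRec (n : Nat) :
    ∀ l : List Int, l.length ≤ n →
      (∀ acc : List Int, flushB (l.foldl combineBlockStep (acc, none)) = acc ++ mergeRec l) ∧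
      (∀ acc : List Int, ∀ p : Int, flushB (l.foldl combineBlockStep (acc, some p)) = acc ++ mergeRec (p :: l)) := by
  induction n with
  | zero =>
    intro l hl
    have : l = [] := List.eq_nil_of_length_eq_zero (by omega)
    subst this
    exact ⟨fun acc => by simp [flushB, mergeRec], fun acc p => by simp [flushB, mergeRec]⟩
  | succ n ih =>
    intro l hl
    cases l with
    | nil => exact ⟨fun acc => by simp [flushB, mergeRec], fun acc p => by simp [flushB, mergeRec]⟩
    | cons x rest =>
      have hr : rest.length ≤ n := by simpa using Nat.lt_succ_iff.mp (by simpa using hl)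
      constructor
      · intro acc
        have := (ih rest hr).2 acc x
        simpa [List.foldl_cons, combineBlockStep] using this
      · intro acc p
        by_cases hpx : p = x
        · have := (ih rest hr).1 (acc ++ [p + x])
          simp only [List.foldl_cons, combineBlockStep]
          rw [if_pos (show (p == x) = true by simpa using hpx), this, mergeRec]
          simp [hpx]
        · have := (ih rest hr).2 (acc ++ [p]) x
          simp only [List.foldl_cons, combineBlockStep]
          rw [if_neg (show ¬ (p == x) = true by simpa using hpx), this, mergeRec]
          simp [hpx]

-- ===== VERDICT (by name: the statement is the Claim_ definition above) =====
theorem combineBlock_spec : Claim_equal_combineBlock := by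
  intro block _
  unfold Spec_combineBlock combineBlock combineBlock_alt
  have hA := combineBlockLoop_eq_mergeRec_drop block 0 []
  have hB := (foldB_eq_mergeRec block.length block (le_refl _)).1 []
  simp only [List.drop_zero, List.nil_append] at hA
  simp only [flushB] at hB
  simp only [List.nil_append] at hB
  rw [hA]
  exact hB.symm
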